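-- pv_equiv track=rewrite | github.com/qwe317149766/tk-play-vedio | mssdk/get_seed/seed_test.py | make_two_part
-- ===== SOURCE A (Python) =====
-- word_19DED0 = [0, 0x1021, 0x2042, 0x3063, 0x4084, 0x50A5, 0x60C6
--     , 0x70E7, 0x8108, 0x9129, 0xA14A, 0xB16B, 0xC18C, 0xD1AD
--     , 0xE1CE, 0xF1EF, 0x1231, 0x210, 0x3273, 0x2252, 0x52B5
--     , 0x4294, 0x72F7, 0x62D6, 0x9339, 0x8318, 0xB37B, 0xA35A
--     , 0xD3BD, 0xC39C, 0xF3FF, 0xE3DE, 0x2462, 0x3443, 0x420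
--     , 0x1401, 0x64E6, 0x74C7, 0x44A4, 0x5485, 0xA56A, 0xB54B
--     , 0x8528, 0x9509, 0xE5EE, 0xF5CF, 0xC5AC, 0xD58D, 0x3653
--     , 0x2672, 0x1611, 0x630, 0x76D7, 0x66F6, 0x5695, 0x46B4
--     , 0xB75B, 0xA77A, 0x9719, 0x8738, 0xF7DF, 0xE7FE, 0xD79D
--     , 0xC7BC, 0x48C4, 0x58E5, 0x6886, 0x78A7, 0x840, 0x1861
--     , 0x2802, 0x3823, 0xC9CC, 0xD9ED, 0xE98E, 0xF9AF, 0x8948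
--     , 0x9969, 0xA90A, 0xB92B, 0x5AF5, 0x4AD4, 0x7AB7, 0x6A96
--     , 0x1A71, 0xA50, 0x3A33, 0x2A12, 0xDBFD, 0xCBDC, 0xFBBF
--     , 0xEB9E, 0x9B79, 0x8B58, 0xBB3B, 0xAB1A, 0x6CA6, 0x7C87
--     , 0x4CE4, 0x5CC5, 0x2C22, 0x3C03, 0xC60, 0x1C41, 0xEDAE
--     , 0xFD8F, 0xCDEC, 0xDDCD, 0xAD2A, 0xBD0B, 0x8D68, 0x9D49
--     , 0x7E97, 0x6EB6, 0x5ED5, 0x4EF4, 0x3E13, 0x2E32, 0x1E51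
--     , 0xE70, 0xFF9F, 0xEFBE, 0xDFDD, 0xCFFC, 0xBF1B, 0xAF3A
--     , 0x9F59, 0x8F78, 0x9188, 0x81A9, 0xB1CA, 0xA1EB, 0xD10C
--     , 0xC12D, 0xF14E, 0xE16F, 0x1080, 0xA1, 0x30C2, 0x20E3
--     , 0x5004, 0x4025, 0x7046, 0x6067, 0x83B9, 0x9398, 0xA3FB
--     , 0xB3DA, 0xC33D, 0xD31C, 0xE37F, 0xF35E, 0x2B1, 0x1290
--     , 0x22F3, 0x32D2, 0x4235, 0x5214, 0x6277, 0x7256, 0xB5EA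
--     , 0xA5CB, 0x95A8, 0x8589, 0xF56E, 0xE54F, 0xD52C, 0xC50D
--     , 0x34E2, 0x24C3, 0x14A0, 0x481, 0x7466, 0x6447, 0x5424
--     , 0x4405, 0xA7DB, 0xB7FA, 0x8799, 0x97B8, 0xE75F, 0xF77E
--     , 0xC71D, 0xD73C, 0x26D3, 0x36F2, 0x691, 0x16B0, 0x6657
--     , 0x7676, 0x4615, 0x5634, 0xD94C, 0xC96D, 0xF90E, 0xE92F
--     , 0x99C8, 0x89E9, 0xB98A, 0xA9AB, 0x5844, 0x4865, 0x7806
--     , 0x6827, 0x18C0, 0x8E1, 0x3882, 0x28A3, 0xCB7D, 0xDB5C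
--     , 0xEB3F, 0xFB1E, 0x8BF9, 0x9BD8, 0xABBB, 0xBB9A, 0x4A75
--     , 0x5A54, 0x6A37, 0x7A16, 0xAF1, 0x1AD0, 0x2AB3, 0x3A92
--     , 0xFD2E, 0xED0F, 0xDD6C, 0xCD4D, 0xBDAA, 0xAD8B, 0x9DE8
--     , 0x8DC9, 0x7C26, 0x6C07, 0x5C64, 0x4C45, 0x3CA2, 0x2C83
--     , 0x1CE0, 0xCC1, 0xEF1F, 0xFF3E, 0xCF5D, 0xDF7C, 0xAF9B
--     , 0xBFBA, 0x8FD9, 0x9FF8, 0x6E17, 0x7E36, 0x4E55, 0x5E74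
--     , 0x2E93, 0x3EB2, 0xED1, 0x1EF0]
--
-- def make_two_part(data: hex):
--     data = bytes.fromhex(data)
--     length = len(data)
--     if length < 1:
--         return 0
--
--     # C 代码中用作累加器的 result 变量，我们用一个更清晰的名字 hash_val
--     # LODWORD(result) = 0;
--     hash_val = 0
--
--     # 循环遍历每一个字节
--     # do { ... } while (a2);
--     for current_byte in data:
--         # C: BYTE1(result)
--         # 获取 hash_val 的第二个字节 (0x11223344 中的 0x33)
--         byte1_of_hash = (hash_val >> 8) & 0xFF
--
--         # C: (unsigned __int8)((v3 | BYTE1(result)) - (v3 & BYTE1(result)))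
--         # 这等价于 (current_byte ^ byte1_of_hash)
--         table_index = current_byte ^ byte1_of_hash
--
--         # C: word_19DED0[...]
--         # 从查找表中获取值
--         lookup_value = word_19DED0[table_index]
--
--         # C: ((_DWORD)result << 8)
--         # 将当前的哈希值左移8位
--         shifted_hash = hash_val << 8
--
--         # C: lookup_value ^ shifted_hash
--         # 将查表值与移位后的哈希值进行异或
--         new_hash = lookup_value ^ shifted_hash
--
--         # 在Python中，整数是无限精度的。C 代码中的 `unsigned int` 或 `_DWORD`
--         # 意味着结果会被限制在32位。我们通过与 0xFFFFFFFF 进行按位与操作来模拟这个行为。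
--         hash_val = new_hash & 0xFFFFFFFF
--     # 确定长度
--     dataLen = len(data)
--     w9 = (-dataLen) & 0x7
--     w10 = w9 ^ 7
--     w9 = (w9 << 1) & 0b111
--     w24 = (w9 + w10) & 0xFFFFFFFF
--     w9 = (w24 + 3) & 0xFFFFFFFF
--     w9 = w9 if w24 < 0 else w24
--     w9 = w9 & 0xFFFFFFFC
--     w21 = (w24 - w9)
--     shift = (4 - w21) * 8
--     return (((hash_val << shift) & 0xFFFFFFFF) >> shift).to_bytes(w21, "big").hex()
-- ===== SOURCE B (Python) =====
-- def make_two_part(data: hex):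
--     buf = bytes.fromhex(data)
--     crc = 0   # 16-bit CRC-CCITT register, computed bit by bit (no table)
--     hi = 0    # upper 16 bits of A's 32-bit accumulator: a pure byte shift history
--     for byte in buf:
--         hi = ((hi << 8) | (crc >> 8)) & 0xFFFF
--         for i in range(8):
--             bit = (byte >> (7 - i)) & 1
--             feedback = ((crc >> 15) & 1) ^ bit
--             crc = (crc << 1) & 0xFFFF
--             if feedback:
--                 crc ^= 0x1021
--     hash_val = (hi << 16) | crc
--     n = (3 - len(buf)) % 4
--     return (hash_val & ((1 << (8 * n)) - 1)).to_bytes(n, "big").hex()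
-- ===== Notes on version B (the rewrite author's own statement) =====
-- stated objective: alternative
-- what changed: B drops the 256-entry lookup table and computes the CRC bit by bit: a 16-bit CRC-CCITT register stepped 8 bits per byte plus a 16-bit shift-history register for the accumulator's upper half, and it replaces A's eight-line w9/w10/w24 length dance by the single expression (3 - len) % 4.
-- outside the precondition, e.g. on make_two_part(''): A returns 0, B returns '000000'
import Mathlib
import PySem

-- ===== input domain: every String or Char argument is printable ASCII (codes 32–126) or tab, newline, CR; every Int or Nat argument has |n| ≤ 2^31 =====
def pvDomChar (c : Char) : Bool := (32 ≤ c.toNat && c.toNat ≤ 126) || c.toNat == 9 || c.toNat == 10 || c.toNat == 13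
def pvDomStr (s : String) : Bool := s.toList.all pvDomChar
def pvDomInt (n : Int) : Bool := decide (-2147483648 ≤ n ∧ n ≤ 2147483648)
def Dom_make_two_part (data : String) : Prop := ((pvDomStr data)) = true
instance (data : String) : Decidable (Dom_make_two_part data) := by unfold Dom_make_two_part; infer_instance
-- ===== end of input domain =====

-- B replaces the 256-entry CRC table by a bit-by-bit CRC-CCITT update: a 16-bit register
-- stepped 8 bits per byte plus a 16-bit shift-history register for the accumulator's high
-- half, and computes the trailing length dance as the single expression (3 - len) % 4.

-- ===== PORT A =====

-- Python: bytes.fromhex(data); skips ASCII whitespace between pairs, none = ValueError (exact for Python 3.11)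
def pyIsSpace (c : Char) : Bool := c == ' ' || c == '\t' || c == '\n' || c == '\r' || c.toNat == 11 || c.toNat == 12

def hexVal? (c : Char) : Option Nat :=
  if 48 ≤ c.toNat ∧ c.toNat ≤ 57 then some (c.toNat - 48)        -- '0'-'9'
  else if 97 ≤ c.toNat ∧ c.toNat ≤ 102 then some (c.toNat - 87)  -- 'a'-'f'
  else if 65 ≤ c.toNat ∧ c.toNat ≤ 70 then some (c.toNat - 55)   -- 'A'-'F'
  else none

def fromhex? : List Char → Option (List Nat)
  | [] => some []
  | c :: rest =>
    if pyIsSpace c then fromhex? rest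
    else
      match rest with
      | [] => none
      | c2 :: rest2 =>
        match hexVal? c, hexVal? c2 with
        | some h, some l => (fromhex? rest2).map (fun bs => (16 * h + l) :: bs)
        | _, _ => none

-- Python: int.to_bytes(k, "big") for a value known to fit in k bytes
def toBytesBE : Nat → Nat → List Nat
  | 0, _ => []
  | k + 1, v => toBytesBE k (v / 256) ++ [v % 256]

-- Python: bytes.hex(): two lowercase hex digits per byte
def hexChar (n : Nat) : Char := if n < 10 then Char.ofNat (48 + n) else Char.ofNat (87 + n)
def bytesHex (bs : List Nat) : List Char := bs.flatMap (fun b => [hexChar (b / 16), hexChar (b % 16)])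

def word19DED0 : List Nat :=
  [ 0x0000, 0x1021, 0x2042, 0x3063, 0x4084, 0x50A5, 0x60C6, 0x70E7
  , 0x8108, 0x9129, 0xA14A, 0xB16B, 0xC18C, 0xD1AD, 0xE1CE, 0xF1EF
  , 0x1231, 0x0210, 0x3273, 0x2252, 0x52B5, 0x4294, 0x72F7, 0x62D6
  , 0x9339, 0x8318, 0xB37B, 0xA35A, 0xD3BD, 0xC39C, 0xF3FF, 0xE3DE
  , 0x2462, 0x3443, 0x0420, 0x1401, 0x64E6, 0x74C7, 0x44A4, 0x5485
  , 0xA56A, 0xB54B, 0x8528, 0x9509, 0xE5EE, 0xF5CF, 0xC5AC, 0xD58D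
  , 0x3653, 0x2672, 0x1611, 0x0630, 0x76D7, 0x66F6, 0x5695, 0x46B4
  , 0xB75B, 0xA77A, 0x9719, 0x8738, 0xF7DF, 0xE7FE, 0xD79D, 0xC7BC
  , 0x48C4, 0x58E5, 0x6886, 0x78A7, 0x0840, 0x1861, 0x2802, 0x3823
  , 0xC9CC, 0xD9ED, 0xE98E, 0xF9AF, 0x8948, 0x9969, 0xA90A, 0xB92B
  , 0x5AF5, 0x4AD4, 0x7AB7, 0x6A96, 0x1A71, 0x0A50, 0x3A33, 0x2A12
  , 0xDBFD, 0xCBDC, 0xFBBF, 0xEB9E, 0x9B79, 0x8B58, 0xBB3B, 0xAB1A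
  , 0x6CA6, 0x7C87, 0x4CE4, 0x5CC5, 0x2C22, 0x3C03, 0x0C60, 0x1C41
  , 0xEDAE, 0xFD8F, 0xCDEC, 0xDDCD, 0xAD2A, 0xBD0B, 0x8D68, 0x9D49
  , 0x7E97, 0x6EB6, 0x5ED5, 0x4EF4, 0x3E13, 0x2E32, 0x1E51, 0x0E70
  , 0xFF9F, 0xEFBE, 0xDFDD, 0xCFFC, 0xBF1B, 0xAF3A, 0x9F59, 0x8F78
  , 0x9188, 0x81A9, 0xB1CA, 0xA1EB, 0xD10C, 0xC12D, 0xF14E, 0xE16F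
  , 0x1080, 0x00A1, 0x30C2, 0x20E3, 0x5004, 0x4025, 0x7046, 0x6067
  , 0x83B9, 0x9398, 0xA3FB, 0xB3DA, 0xC33D, 0xD31C, 0xE37F, 0xF35E
  , 0x02B1, 0x1290, 0x22F3, 0x32D2, 0x4235, 0x5214, 0x6277, 0x7256
  , 0xB5EA, 0xA5CB, 0x95A8, 0x8589, 0xF56E, 0xE54F, 0xD52C, 0xC50D
  , 0x34E2, 0x24C3, 0x14A0, 0x0481, 0x7466, 0x6447, 0x5424, 0x4405
  , 0xA7DB, 0xB7FA, 0x8799, 0x97B8, 0xE75F, 0xF77E, 0xC71D, 0xD73C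
  , 0x26D3, 0x36F2, 0x0691, 0x16B0, 0x6657, 0x7676, 0x4615, 0x5634
  , 0xD94C, 0xC96D, 0xF90E, 0xE92F, 0x99C8, 0x89E9, 0xB98A, 0xA9AB
  , 0x5844, 0x4865, 0x7806, 0x6827, 0x18C0, 0x08E1, 0x3882, 0x28A3
  , 0xCB7D, 0xDB5C, 0xEB3F, 0xFB1E, 0x8BF9, 0x9BD8, 0xABBB, 0xBB9A
  , 0x4A75, 0x5A54, 0x6A37, 0x7A16, 0x0AF1, 0x1AD0, 0x2AB3, 0x3A92
  , 0xFD2E, 0xED0F, 0xDD6C, 0xCD4D, 0xBDAA, 0xAD8B, 0x9DE8, 0x8DC9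
  , 0x7C26, 0x6C07, 0x5C64, 0x4C45, 0x3CA2, 0x2C83, 0x1CE0, 0x0CC1
  , 0xEF1F, 0xFF3E, 0xCF5D, 0xDF7C, 0xAF9B, 0xBFBA, 0x8FD9, 0x9FF8
  , 0x6E17, 0x7E36, 0x4E55, 0x5E74, 0x2E93, 0x3EB2, 0x0ED1, 0x1EF0 ]

-- A's loop body, verbatim (the list index is always < 256 = the table length, so getD is exact)
def aByteStep (hash_val current_byte : Nat) : Nat :=
  let byte1_of_hash := (hash_val >>> 8) &&& 0xFF
  let table_index := current_byte ^^^ byte1_of_hash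
  let lookup_value := word19DED0.getD table_index 0
  let shifted_hash := hash_val <<< 8
  let new_hash := lookup_value ^^^ shifted_hash
  new_hash &&& 0xFFFFFFFF

def make_two_part (data : String) : String :=
  match fromhex? data.toList with
  | none => ""          -- bytes.fromhex raises ValueError here: excluded by Pre_
  | some bs =>
    if bs.length < 1 then ""   -- Python returns the int 0 here (not a str): excluded by Pre_
    else
      let hash_val := bs.foldl aByteStep 0
      let dataLen : Int := bs.length
      let w9 := PySem.Int.band (-dataLen) 0x7
      let w10 := PySem.Int.bxor w9 7
      let w9 := PySem.Int.band (w9 <<< (1 : Nat)) 7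
      let w24 := PySem.Int.band (w9 + w10) 0xFFFFFFFF
      let w9 := PySem.Int.band (w24 + 3) 0xFFFFFFFF
      let w9 := if w24 < 0 then w9 else w24
      let w9 := PySem.Int.band w9 0xFFFFFFFC
      let w21 := w24 - w9
      let shift := ((4 - w21) * 8).toNat     -- always ≥ 8 here, so .toNat is exact
      String.ofList (bytesHex (toBytesBE w21.toNat (((hash_val <<< shift) &&& 0xFFFFFFFF) >>> shift)))

-- ===== PORT B =====

-- Source B inner-loop body: one bit of the 16-bit CRC-CCITT register update
def crcBitStep (c t : Nat) : Nat :=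
  let feedback := ((c >>> 15) &&& 1) ^^^ t
  let c' := (c <<< 1) &&& 0xFFFF
  if feedback ≠ 0 then c' ^^^ 0x1021 else c'

-- Source B: for i in range(8): bit = (byte >> (7 - i)) & 1; …
def crcByte (c byte : Nat) : Nat :=
  (List.range 8).foldl (fun c i => crcBitStep c ((byte >>> (7 - i)) &&& 1)) c

-- Source B outer-loop body on the pair (hi, crc)
def bByteStep (p : Nat × Nat) (byte : Nat) : Nat × Nat :=
  (((p.1 <<< 8) ||| (p.2 >>> 8)) &&& 0xFFFF, crcByte p.2 byte)

def make_two_part_alt (data : String) : String :=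
  match fromhex? data.toList with
  | none => ""          -- bytes.fromhex raises ValueError here: excluded by Pre_
  | some buf =>
    let st := buf.foldl bByteStep (0, 0)
    let hash_val := (st.1 <<< 16) ||| st.2
    let n := (PySem.Int.mod (3 - (buf.length : Int)) 4).toNat   -- (3 - len) % 4 ∈ [0, 3], so .toNat is exact
    String.ofList (bytesHex (toBytesBE n (hash_val &&& ((1 <<< (8 * n)) - 1))))

-- ===== PRECONDITION & SPEC =====

-- same pair grammar as bytes.fromhex, written as a plain check (no byte values computed)
def hexDigitsLower : String := "0123456789abcdef"
def hexDigitsUpper : String := "0123456789ABCDEF"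
def isHexDigit (c : Char) : Bool :=
  hexDigitsLower.toList.any (fun d => d.toNat == c.toNat)
    || hexDigitsUpper.toList.any (fun d => d.toNat == c.toNat)
def hexOk : List Char → Bool
  | [] => true
  | c :: rest =>
    if pyIsSpace c then hexOk rest
    else
      match rest with
      | [] => false
      | c2 :: rest2 => isHexDigit c && isHexDigit c2 && hexOk rest2

-- Pre_ excludes strings bytes.fromhex rejects (A raises ValueError) and strings denoting zero
-- bytes (empty / whitespace-only), where A returns the int 0, which is not a str.
def Pre_make_two_part (data : String) : Prop :=
  hexOk data.toList = true ∧ data.toList.any (fun c => !pyIsSpace c) = true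
instance (data : String) : Decidable (Pre_make_two_part data) := by unfold Pre_make_two_part; infer_instance

def pvWitness_make_two_part : String := "ab"

def Spec_make_two_part (data : String) (out : String) : Prop := out = make_two_part_alt data
instance (data : String) (out : String) : Decidable (Spec_make_two_part data out) := by unfold Spec_make_two_part; infer_instance

-- ===== CLAIM (what is proved, stated in full; the proofs are below) =====
def Claim_equal_make_two_part : Prop := ∀ (data : String), Dom_make_two_part data → Pre_make_two_part data → Spec_make_two_part data (make_two_part data)

-- ===== LEMMAS AND PROOFS =====
theorem xor_le_one {a b : Nat} (ha : a ≤ 1) (hb : b ≤ 1) : a ^^^ b ≤ 1 := by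
  interval_cases a <;> interval_cases b <;> decide

theorem crcBitStep_closed (c t : Nat) (ht : t ≤ 1) :
    crcBitStep c t = ((c <<< 1) &&& 0xFFFF) ^^^ ((((c >>> 15) &&& 1) ^^^ t) * 0x1021) := by
  simp only [crcBitStep]
  have h2 : ((c >>> 15) &&& 1) ^^^ t ≤ 1 := xor_le_one Nat.and_le_right ht
  rcases Nat.le_one_iff_eq_zero_or_eq_one.mp h2 with h | h <;> rw [h] <;> simp

theorem linStep (x y tx ty : Nat) (hx : tx ≤ 1) (hy : ty ≤ 1) :
    crcBitStep (x ^^^ y) (tx ^^^ ty) = crcBitStep x tx ^^^ crcBitStep y ty := by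
  rw [crcBitStep_closed _ _ (xor_le_one hx hy), crcBitStep_closed _ _ hx, crcBitStep_closed _ _ hy]
  have hS : ((x ^^^ y) <<< 1) &&& 0xFFFF = (((x <<< 1) &&& 0xFFFF) ^^^ ((y <<< 1) &&& 0xFFFF)) := by
    rw [Nat.shiftLeft_xor_distrib, Nat.and_xor_distrib_right]
  have hE : (((x ^^^ y) >>> 15) &&& 1) ^^^ (tx ^^^ ty)
      = ((((x >>> 15) &&& 1) ^^^ tx) ^^^ (((y >>> 15) &&& 1) ^^^ ty)) := by
    rw [Nat.shiftRight_xor_distrib, Nat.and_xor_distrib_right]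
    simp [Nat.xor_assoc, Nat.xor_comm, Nat.xor_left_comm]
  rw [hS, hE]
  have e1 : ((x >>> 15) &&& 1) ^^^ tx ≤ 1 := xor_le_one Nat.and_le_right hx
  have e2 : ((y >>> 15) &&& 1) ^^^ ty ≤ 1 := xor_le_one Nat.and_le_right hy
  have hmul : ∀ a b : Nat, a ≤ 1 → b ≤ 1 → (a ^^^ b) * 0x1021 = (a * 0x1021) ^^^ (b * 0x1021) := by
    intro a b ha hb; interval_cases a <;> interval_cases b <;> decide
  rw [hmul _ _ e1 e2]
  simp [Nat.xor_assoc, Nat.xor_comm, Nat.xor_left_comm]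

theorem foldLin (l : List Nat) (x y b : Nat) :
    l.foldl (fun c i => crcBitStep c ((b >>> (7 - i)) &&& 1)) (x ^^^ y)
      = (l.foldl (fun c i => crcBitStep c ((b >>> (7 - i)) &&& 1)) x)
        ^^^ (l.foldl (fun c i => crcBitStep c (((0 : Nat) >>> (7 - i)) &&& 1)) y) := by
  induction l generalizing x y with
  | nil => rfl
  | cons i l ih =>
    simp only [List.foldl_cons]
    have hz : ((0 : Nat) >>> (7 - i)) &&& 1 = 0 := by simp
    have hb : crcBitStep (x ^^^ y) ((b >>> (7 - i)) &&& 1)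
        = crcBitStep x ((b >>> (7 - i)) &&& 1) ^^^ crcBitStep y 0 := by
      have := linStep x y ((b >>> (7 - i)) &&& 1) 0 Nat.and_le_right (by omega)
      simpa using this
    rw [hz, hb, ih]

theorem crcByte_lin (x y b : Nat) : crcByte (x ^^^ y) b = crcByte x b ^^^ crcByte y 0 := by
  simpa [crcByte] using foldLin (List.range 8) x y b

theorem xor_shl_add (u v k : Nat) (hv : v < 2 ^ k) : (u <<< k) ^^^ v = u * 2 ^ k + v := by
  have hmod : ((u <<< k) ^^^ v) % 2 ^ k = v := by
    have h := Nat.and_two_pow_sub_one_eq_mod ((u <<< k) ^^^ v) k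
    rw [Nat.and_xor_distrib_right, Nat.and_two_pow_sub_one_eq_mod, Nat.and_two_pow_sub_one_eq_mod,
      Nat.shiftLeft_eq, Nat.mul_mod_left, Nat.mod_eq_of_lt hv] at h
    simpa [Nat.shiftLeft_eq] using h.symm
  have hdiv : ((u <<< k) ^^^ v) / 2 ^ k = u := by
    have h : ((u <<< k) ^^^ v) >>> k = (u <<< k) >>> k ^^^ v >>> k := Nat.shiftRight_xor_distrib
    rw [Nat.shiftRight_eq_div_pow, Nat.shiftRight_eq_div_pow, Nat.shiftRight_eq_div_pow,
      Nat.shiftLeft_eq, Nat.mul_div_cancel _ (by positivity), Nat.div_eq_of_lt hv] at h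
    simpa [Nat.shiftLeft_eq] using h
  have h := (Nat.div_add_mod ((u <<< k) ^^^ v) (2 ^ k)).symm
  rw [hdiv, hmod] at h
  rw [h, Nat.mul_comm]

theorem or_shl_add (u v k : Nat) (hv : v < 2 ^ k) : (u <<< k) ||| v = u * 2 ^ k + v := by
  have hmod : ((u <<< k) ||| v) % 2 ^ k = v := by
    have h := Nat.and_two_pow_sub_one_eq_mod ((u <<< k) ||| v) k
    rw [Nat.and_or_distrib_right, Nat.and_two_pow_sub_one_eq_mod, Nat.and_two_pow_sub_one_eq_mod,
      Nat.shiftLeft_eq, Nat.mul_mod_left, Nat.mod_eq_of_lt hv] at h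
    simpa [Nat.shiftLeft_eq] using h.symm
  have hdiv : ((u <<< k) ||| v) / 2 ^ k = u := by
    have h : ((u <<< k) ||| v) >>> k = (u <<< k) >>> k ||| v >>> k := Nat.shiftRight_or_distrib
    rw [Nat.shiftRight_eq_div_pow, Nat.shiftRight_eq_div_pow, Nat.shiftRight_eq_div_pow,
      Nat.shiftLeft_eq, Nat.mul_div_cancel _ (by positivity), Nat.div_eq_of_lt hv] at h
    simpa [Nat.shiftLeft_eq] using h
  have h := (Nat.div_add_mod ((u <<< k) ||| v) (2 ^ k)).symm
  rw [hdiv, hmod] at h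
  rw [h, Nat.mul_comm]
set_option maxRecDepth 4096 in
theorem table_lt : ∀ i < 256, word19DED0.getD i 0 < 65536 := by decide
set_option maxRecDepth 4096 in
theorem crcByte_shl8 : ∀ x < 256, crcByte (x <<< 8) 0 = word19DED0.getD x 0 := by decide
set_option maxRecDepth 4096 in
theorem crcByte_zero : ∀ b < 256, crcByte 0 b = word19DED0.getD b 0 := by decide
set_option maxRecDepth 4096 in
theorem crcByte_low : ∀ x < 256, crcByte x 0 = x <<< 8 := by decide

set_option maxRecDepth 4096 in
theorem table_lt' (i : Nat) : word19DED0.getD i 0 < 65536 := by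
  by_cases h : i < 256
  · exact table_lt i h
  · rw [List.getD_eq_default]
    · norm_num
    · have : word19DED0.length = 256 := by decide
      omega

-- the table is xor-linear
theorem table_lin (x b : Nat) (hx : x < 256) (hb : b < 256) :
    word19DED0.getD (x ^^^ b) 0 = word19DED0.getD x 0 ^^^ word19DED0.getD b 0 := by
  have hxb : x ^^^ b < 256 := by
    have := Nat.xor_lt_two_pow (x := x) (y := b) (n := 8) (by omega) (by omega)
    omega
  have h1 := crcByte_shl8 (x ^^^ b) hxb
  rw [Nat.shiftLeft_xor_distrib] at h1
  rw [← h1, crcByte_lin, crcByte_shl8 x hx, crcByte_shl8 b hb]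

-- bit-by-bit CRC of one byte = A's table update, on the 16-bit register
theorem key_char (c b : Nat) (hc : c < 65536) (hb : b < 256) :
    crcByte c b = word19DED0.getD ((c >>> 8) ^^^ b) 0 ^^^ ((c &&& 255) <<< 8) := by
  have hc1 : c >>> 8 < 256 := by
    rw [Nat.shiftRight_eq_div_pow]; omega
  have hc0 : c &&& 255 < 256 := by
    have := Nat.and_two_pow_sub_one_eq_mod c 8; norm_num at this; omega
  have hsplit : ((c >>> 8) <<< 8) ^^^ (c &&& 255) = c := by
    rw [xor_shl_add _ _ _ (by simpa using hc0 : c &&& 255 < 2 ^ 8)]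
    have h1 := Nat.and_two_pow_sub_one_eq_mod c 8
    have h2 := Nat.shiftRight_eq_div_pow c 8
    norm_num at h1 h2 ⊢
    omega
  calc crcByte c b = crcByte (((c >>> 8) <<< 8) ^^^ (c &&& 255)) b := by rw [hsplit]
    _ = crcByte ((c >>> 8) <<< 8) b ^^^ crcByte (c &&& 255) 0 := crcByte_lin ..
    _ = (crcByte 0 b ^^^ crcByte ((c >>> 8) <<< 8) 0) ^^^ ((c &&& 255) <<< 8) := by
        rw [crcByte_low _ hc0]
        have := crcByte_lin 0 ((c >>> 8) <<< 8) b
        simpa using this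
    _ = word19DED0.getD ((c >>> 8) ^^^ b) 0 ^^^ ((c &&& 255) <<< 8) := by
        rw [crcByte_zero b hb, crcByte_shl8 _ hc1, table_lin _ _ hc1 hb]
        simp [Nat.xor_comm]

theorem and255 (x : Nat) : x &&& 255 = x % 256 := by
  have := Nat.and_two_pow_sub_one_eq_mod x 8; norm_num at this; exact this
theorem and65535 (x : Nat) : x &&& 65535 = x % 65536 := by
  have := Nat.and_two_pow_sub_one_eq_mod x 16; norm_num at this; exact this
theorem andM32 (x : Nat) : x &&& 0xFFFFFFFF = x % 4294967296 := by
  have := Nat.and_two_pow_sub_one_eq_mod x 32; norm_num at this; exact this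
theorem shr8 (x : Nat) : x >>> 8 = x / 256 := by
  have := Nat.shiftRight_eq_div_pow x 8; norm_num at this; exact this
theorem shr16 (x : Nat) : x >>> 16 = x / 65536 := by
  have := Nat.shiftRight_eq_div_pow x 16; norm_num at this; exact this
theorem shl8 (x : Nat) : x <<< 8 = x * 256 := by
  have := Nat.shiftLeft_eq x 8; norm_num at this; exact this

-- one byte of A's loop, seen through B's state decomposition (high half, 16-bit CRC)
theorem stepPair (h b : Nat) (hh : h < 4294967296) (hb : b < 256) :
    aByteStep h b &&& 65535 = crcByte (h &&& 65535) b
    ∧ aByteStep h b >>> 16 = (((h >>> 16) <<< 8) ||| ((h &&& 65535) >>> 8)) &&& 65535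
    ∧ aByteStep h b < 4294967296 := by
  have hT := table_lt' (b ^^^ ((h >>> 8) &&& 255))
  set T0 := word19DED0.getD (b ^^^ ((h >>> 8) &&& 255)) 0 with hT0
  have hstep : aByteStep h b = (T0 ^^^ (h <<< 8)) &&& 0xFFFFFFFF := rfl
  refine ⟨?_, ?_, ?_⟩
  · rw [hstep, Nat.and_assoc]
    rw [(by decide : (0xFFFFFFFF : Nat) &&& 65535 = 65535), Nat.and_xor_distrib_right]
    have h3 : T0 &&& 65535 = T0 := by rw [and65535, Nat.mod_eq_of_lt hT]
    have h4 : (h <<< 8) &&& 65535 = ((h &&& 65535) &&& 255) <<< 8 := by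
      rw [shl8, and65535, and255, and65535, shl8]; omega
    rw [h3, h4, key_char _ _ (by rw [and65535]; omega) hb]
    have h5 : (h &&& 65535) >>> 8 ^^^ b = b ^^^ ((h >>> 8) &&& 255) := by
      rw [Nat.xor_comm]; congr 1
      rw [and65535, shr8, shr8, and255]; omega
    rw [h5]
  · rw [hstep, Nat.shiftRight_and_distrib, Nat.shiftRight_xor_distrib]
    have h1 : T0 >>> 16 = 0 := by rw [shr16]; omega
    have h2 : (0xFFFFFFFF : Nat) >>> 16 = 65535 := by decide
    rw [h1, h2]
    have h3 : (h &&& 65535) >>> 8 < 256 := by rw [and65535, shr8]; omega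
    rw [or_shl_add _ _ 8 (by norm_num; exact h3)]
    simp only [Nat.zero_xor]
    rw [shl8, shr16, shr16, shr8, and65535, and65535, and65535]
    norm_num
    omega
  · rw [hstep, andM32]; omega
theorem mainFold (bs : List Nat) (hbs : ∀ b ∈ bs, b < 256) (h : Nat) (hh : h < 4294967296) :
    bs.foldl bByteStep (h >>> 16, h &&& 65535)
      = ((bs.foldl aByteStep h) >>> 16, (bs.foldl aByteStep h) &&& 65535)
    ∧ bs.foldl aByteStep h < 4294967296 := by
  induction bs generalizing h with
  | nil => exact ⟨rfl, hh⟩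
  | cons b bs ih =>
    have hb : b < 256 := hbs b (by simp)
    obtain ⟨h1, h2, h3⟩ := stepPair h b hh hb
    have hstep : bByteStep (h >>> 16, h &&& 65535) b
        = (aByteStep h b >>> 16, aByteStep h b &&& 65535) := by
      simp only [bByteStep]
      rw [← h1, ← h2]
    simp only [List.foldl_cons, hstep]
    exact ih (fun x hx => hbs x (by simp [hx])) (aByteStep h b) h3

theorem reconstruct (h : Nat) (hh : h < 4294967296) : ((h >>> 16) <<< 16) ||| (h &&& 65535) = h := by
  rw [or_shl_add _ _ 16 (by rw [and65535]; norm_num [Nat.mod_lt])]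
  rw [shr16, and65535]
  norm_num
  omega

theorem hexVal_lt {c : Char} {v : Nat} (h : hexVal? c = some v) : v < 16 := by
  unfold hexVal? at h
  split_ifs at h <;> simp_all <;> omega

theorem bandNeg7 (L : Nat) : PySem.Int.band (-(L : Int)) 7 = ((8 - L % 8) % 8 : Nat) := by
  match L with
  | 0 => decide
  | (n + 1) =>
    have hneg : ¬ (0 ≤ -((n + 1 : Nat) : Int)) := by push_cast; omega
    rw [PySem.Int.band]
    simp only [hneg, if_false, if_pos (by norm_num : (0:Int) ≤ 7)]
    have h1 : (-(-((n + 1 : Nat) : Int)) - 1).toNat = n := by push_cast; omega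
    rw [h1]
    have h2 : (7 : Int).toNat = 7 := rfl
    rw [h2]
    have h3 : 7 &&& n = n % 8 := by
      have := Nat.and_two_pow_sub_one_eq_mod n 3; norm_num at this
      rw [Nat.land_comm]; exact this
    rw [h3]
    have : (n + 1) % 8 = (n % 8) + 1 ∨ ((n + 1) % 8 = 0 ∧ n % 8 = 7) := by omega
    push_cast
    omega

-- the w9/w10/w24 dance from A, from the second assignment on
def tailChain (w9₀ : Int) : Int :=
  let w10 := PySem.Int.bxor w9₀ 7
  let w9 := PySem.Int.band (w9₀ <<< (1 : Nat)) 7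
  let w24 := PySem.Int.band (w9 + w10) 0xFFFFFFFF
  let w9 := PySem.Int.band (w24 + 3) 0xFFFFFFFF
  let w9 := if w24 < 0 then w9 else w24
  let w9 := PySem.Int.band w9 0xFFFFFFFC
  w24 - w9

theorem chainSmall : ∀ a < 8, tailChain ((a : Nat) : Int) = (((3 + a) % 4 : Nat) : Int) := by decide

theorem w21_eq (L : Nat) : tailChain (PySem.Int.band (-(L : Int)) 7) = PySem.Int.mod (3 - (L : Int)) 4 := by
  rw [bandNeg7, chainSmall _ (by omega), PySem.Int.mod_eq_emod_of_pos (by norm_num : (0:Int) < 4)]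
  have h1 : (8 - L % 8) % 8 < 8 := by omega
  push_cast
  omega

theorem valueEq (hsh k : Nat) (hk : k ≤ 4) :
    ((hsh <<< ((4 - k) * 8)) &&& 0xFFFFFFFF) >>> ((4 - k) * 8) = hsh &&& ((1 <<< (8 * k)) - 1) := by
  have hrhs : (1 : Nat) <<< (8 * k) - 1 = 2 ^ (8 * k) - 1 := by rw [Nat.one_shiftLeft]
  rw [hrhs, Nat.and_two_pow_sub_one_eq_mod, andM32, Nat.shiftLeft_eq, Nat.shiftRight_eq_div_pow]
  have hpow : (4294967296 : Nat) = 2 ^ (8 * k) * 2 ^ ((4 - k) * 8) := by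
    have h32 : 8 * k + (4 - k) * 8 = 32 := by omega
    rw [← pow_add, h32]
    norm_num
  rw [hpow, Nat.mul_mod_mul_right, Nat.mul_div_cancel _ (by positivity)]
theorem isHexDigit_eq (c : Char) : isHexDigit c = (hexVal? c).isSome := by
  unfold isHexDigit hexDigitsLower hexDigitsUpper hexVal?
  have h1 : ("0123456789abcdef").toList
      = ['0','1','2','3','4','5','6','7','8','9','a','b','c','d','e','f'] := by decide
  have h2 : ("0123456789ABCDEF").toList
      = ['0','1','2','3','4','5','6','7','8','9','A','B','C','D','E','F'] := by decide
  rw [h1, h2]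
  simp only [List.any_cons, List.any_nil]
  split_ifs <;> simp <;> omega

theorem hexOk_fromhex : ∀ cs : List Char, hexOk cs = true →
    ∃ bs, fromhex? cs = some bs ∧ (∀ b ∈ bs, b < 256) ∧ (bs = [] ↔ cs.all pyIsSpace = true) := by
  intro cs hok
  fun_induction hexOk cs with
  | case1 => exact ⟨[], rfl, by simp, by simp⟩
  | case2 c rest hsp ih =>
    obtain ⟨bs, h1, h2, h3⟩ := ih hok
    refine ⟨bs, ?_, h2, ?_⟩
    · rw [fromhex?.eq_def]; simp [hsp, h1]
    · rw [h3]; simp [hsp]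
  | case3 c hnsp =>
    simp at hok
  | case4 c hnsp c2 rest2 ih =>
    rw [isHexDigit_eq, isHexDigit_eq] at hok
    simp only [Bool.and_eq_true, Option.isSome_iff_exists] at hok
    obtain ⟨⟨⟨hv, hveq⟩, ⟨lv, lveq⟩⟩, hok2⟩ := hok
    obtain ⟨bs, h1, h2, h3⟩ := ih hok2
    refine ⟨(16 * hv + lv) :: bs, ?_, ?_, ?_⟩
    · rw [fromhex?.eq_def]; simp [hnsp, hveq, lveq, h1]
    · intro b hb
      rcases List.mem_cons.mp hb with hb | hb
      · have := hexVal_lt hveq; have := hexVal_lt lveq; omega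
      · exact h2 _ hb
    · simp [hnsp]
theorem finalEq (hA : Nat) (hlt : hA < 4294967296) (L : Nat) :
    String.ofList (bytesHex (toBytesBE (tailChain (PySem.Int.band (-(L : Int)) 7)).toNat
        (((hA <<< ((4 - tailChain (PySem.Int.band (-(L : Int)) 7)) * 8).toNat) &&& 0xFFFFFFFF)
          >>> ((4 - tailChain (PySem.Int.band (-(L : Int)) 7)) * 8).toNat)))
      = String.ofList (bytesHex (toBytesBE (PySem.Int.mod (3 - (L : Int)) 4).toNat
        ((((hA >>> 16) <<< 16) ||| (hA &&& 65535)) &&& ((1 <<< (8 * (PySem.Int.mod (3 - (L : Int)) 4).toNat)) - 1)))) := by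
  rw [w21_eq, reconstruct hA hlt]
  have h0 : 0 ≤ PySem.Int.mod (3 - (L : Int)) 4 := PySem.Int.mod_nonneg (a := 3 - (L : Int)) (by norm_num)
  have h4 : PySem.Int.mod (3 - (L : Int)) 4 < 4 := PySem.Int.mod_lt (a := 3 - (L : Int)) (by norm_num)
  set m := PySem.Int.mod (3 - (L : Int)) 4 with hm
  have hsh : ((4 - m) * 8).toNat = (4 - m.toNat) * 8 := by omega
  rw [hsh, valueEq _ _ (by omega)]

-- ===== VERDICT (by name: the statement is the Claim_ definition above) =====
theorem make_two_part_spec : Claim_equal_make_two_part := by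
  unfold Claim_equal_make_two_part Spec_make_two_part
  intro data _ pre
  obtain ⟨hok, hany⟩ := pre
  obtain ⟨bs, hfh, hblt, hiff⟩ := hexOk_fromhex data.toList hok
  have hbsne : bs ≠ [] := by
    intro hnil
    obtain ⟨c, hc, hcs⟩ := List.any_eq_true.mp hany
    have := List.all_eq_true.mp (hiff.mp hnil) c hc
    simp_all
  have hlen : ¬ bs.length < 1 := by
    cases bs with
    | nil => exact absurd rfl hbsne
    | cons a l => simp
  obtain ⟨hfold, hltA⟩ := mainFold bs hblt 0 (by norm_num)
  unfold make_two_part make_two_part_alt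
  rw [hfh]
  simp only [hlen, if_false]
  rw [show ((0,0) : Nat × Nat) = ((0:Nat) >>> 16, (0:Nat) &&& 65535) from rfl, hfold]
  exact finalEq (List.foldl aByteStep 0 bs) hltA bs.length
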